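-- pv_equiv track=rewrite | github.com/paulklemstine/factor | lean/demo/NumberTheory/IOF/demos/iof_demo.py | find_orbit_period
-- ===== SOURCE A (Python) =====
-- from typing import List, Tuple, Optional, Dict, Set
--
-- def find_orbit_period(x: int, n: int) -> Tuple[int, int]:
--     """Find the preperiod (rho) and period (lambda) of the squaring orbit."""
--     seen = {}
--     current = x % n
--     for k in range(n + 1):
--         if current in seen:
--             rho = seen[current]
--             lam = k - rho
--             return rho, lam
--         seen[current] = k
--         current = pow(current, 2, n)
--     return 0, 1  # fallback
-- ===== SOURCE B (Python) =====
-- from typing import Tuple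
--
--
-- def find_orbit_period(x: int, n: int) -> Tuple[int, int]:
--     """Find the preperiod (rho) and period (lambda) of the squaring orbit,
--     by Floyd's tortoise-and-hare cycle detection (no seen-map)."""
--     if n <= 0:
--         raise ValueError("modulus must be positive")
--     start = x % n
--     # Phase 1: find a meeting point inside the cycle.
--     tortoise = pow(start, 2, n)
--     hare = pow(tortoise, 2, n)
--     while tortoise != hare:
--         tortoise = pow(tortoise, 2, n)
--         hare = pow(pow(hare, 2, n), 2, n)
--     # Phase 2: find the preperiod rho.
--     rho = 0
--     tortoise = start
--     while tortoise != hare: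
--         tortoise = pow(tortoise, 2, n)
--         hare = pow(hare, 2, n)
--         rho += 1
--     # Phase 3: find the period lam.
--     lam = 1
--     probe = pow(tortoise, 2, n)
--     while probe != tortoise:
--         probe = pow(probe, 2, n)
--         lam += 1
--     return rho, lam
-- ===== Notes on version B (the rewrite author's own statement) =====
-- stated objective: alternative
-- what changed: Replaces the seen-dictionary orbit walk with Floyd's tortoise-and-hare cycle detection: three constant-space pointer phases (find a meeting point, count the preperiod, count the period) instead of a hash map of visited values; B rejects a non-positive modulus with ValueError, so Pre_ is n >= 1.
-- outside the precondition, e.g. on find_orbit_period(2, -7): A returns (0, 1), B raises ValueError; on find_orbit_period(3, 0): A raises ZeroDivisionError, B raises ValueError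
import Mathlib
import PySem

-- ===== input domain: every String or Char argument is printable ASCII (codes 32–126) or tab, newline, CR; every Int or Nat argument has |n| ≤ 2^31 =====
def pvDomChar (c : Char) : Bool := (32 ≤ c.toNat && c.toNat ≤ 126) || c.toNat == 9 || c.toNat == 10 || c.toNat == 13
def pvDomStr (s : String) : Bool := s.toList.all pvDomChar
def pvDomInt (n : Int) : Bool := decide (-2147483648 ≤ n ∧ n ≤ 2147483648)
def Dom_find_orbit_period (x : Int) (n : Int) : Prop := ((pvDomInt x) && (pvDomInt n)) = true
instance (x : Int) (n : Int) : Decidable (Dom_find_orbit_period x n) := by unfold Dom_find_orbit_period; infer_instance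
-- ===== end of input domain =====

-- B replaces A's seen-dictionary orbit walk by Floyd's tortoise-and-hare cycle
-- detection (three constant-space pointer phases, no map of visited values).

-- ===== PORT A =====
-- 'for k in range(n + 1)' rendered lazily: 'left' counts the iterations remaining,
-- k is Python's loop variable
def find_orbit_period_loop (n : Int) : Nat → Int → PySem.Dict Int Int → Int → Int × Int
  | 0, _, _, _ => (0, 1)  -- fallback
  | left + 1, k, seen, current =>
    match seen.get? current with
    | some rho => (rho, k - rho)
    | none =>
        find_orbit_period_loop n left (k + 1) (seen.insert current k)
          (PySem.Int.mod (current * current) n)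

def find_orbit_period (x : Int) (n : Int) : Int × Int :=
  find_orbit_period_loop n (n + 1 - 0).toNat 0 PySem.Dict.empty
    (PySem.Int.mod x n)

-- ===== PORT B =====
-- pow(c, 2, n)
def pySquareMod (n : Int) (c : Int) : Int := PySem.Int.mod (c * c) n

-- phase 1 while-loop (the fuel only makes the recursion total; its sufficiency is proved below)
def floydMeet (n : Int) : Nat → Int → Int → Int
  | 0, _, hare => hare
  | fuel + 1, tortoise, hare =>
    if tortoise = hare then hare
    else floydMeet n fuel (pySquareMod n tortoise) (pySquareMod n (pySquareMod n hare))

-- phase 2 while-loop: returns (rho, final tortoise)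
def floydRho (n : Int) : Nat → Int → Int → Int × Int
  | 0, tortoise, _ => (0, tortoise)
  | fuel + 1, tortoise, hare =>
    if tortoise = hare then (0, tortoise)
    else
      let r := floydRho n fuel (pySquareMod n tortoise) (pySquareMod n hare)
      (r.1 + 1, r.2)

-- phase 3 while-loop: number of extra steps beyond the first probe
def floydLam (n : Int) : Nat → Int → Int → Int
  | 0, _, _ => 0
  | fuel + 1, probe, target =>
    if probe = target then 0
    else floydLam n fuel (pySquareMod n probe) target + 1

def find_orbit_period_alt (x : Int) (n : Int) : Int × Int :=
  let start := PySem.Int.mod x n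
  let fuel := n.natAbs + 2
  let meet := floydMeet n fuel (pySquareMod n start) (pySquareMod n (pySquareMod n start))
  let pr := floydRho n fuel start meet
  let lam := 1 + floydLam n fuel (pySquareMod n pr.2) pr.2
  (pr.1, lam)

-- ===== PRECONDITION & SPEC =====
-- Pre_ excludes n ≤ 0: at n = 0 A raises ZeroDivisionError ('x % 0'); for n < 0 the
-- loop range is empty and A returns its constant fallback without looking at the
-- orbit, while B (whose cycle search needs a positive modulus) raises ValueError.
def Pre_find_orbit_period (x : Int) (n : Int) : Prop := 1 ≤ n
instance (x : Int) (n : Int) : Decidable (Pre_find_orbit_period x n) := by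
  unfold Pre_find_orbit_period; infer_instance

def pvWitness_find_orbit_period : Int × Int := (3, 10)

def Spec_find_orbit_period (x : Int) (n : Int) (out : Int × Int) : Prop :=
  out = find_orbit_period_alt x n
instance (x : Int) (n : Int) (out : Int × Int) : Decidable (Spec_find_orbit_period x n out) := by
  unfold Spec_find_orbit_period; infer_instance

-- ===== CLAIM (what is proved, stated in full; the proofs are below) =====
def Claim_equal_find_orbit_period : Prop := ∀ (x : Int) (n : Int), Dom_find_orbit_period x n → Pre_find_orbit_period x n → Spec_find_orbit_period x n (find_orbit_period x n)

-- ===== LEMMAS AND PROOFS =====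

-- the squaring orbit starting at x % n
def orbP (x n : Int) (k : Nat) : Int := (pySquareMod n)^[k] (PySem.Int.mod x n)

-- (mu, lam) is THE preperiod/period pair of the orbit: lam ≥ 1, the value at
-- mu + lam returns to the value at mu, and all earlier orbit values are distinct.
def Good (x n : Int) (mu lam : Nat) : Prop :=
  0 < lam ∧ orbP x n (mu + lam) = orbP x n mu ∧
    ∀ i j : Nat, i < j → j < mu + lam → orbP x n i ≠ orbP x n j

theorem orbP_succ (x n : Int) (k : Nat) :
    orbP x n (k + 1) = pySquareMod n (orbP x n k) := by
  simp [orbP, Function.iterate_succ_apply']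

theorem per (x n : Int) {mu lam : Nat} (h : Good x n mu lam) :
    ∀ i : Nat, mu ≤ i → orbP x n (i + lam) = orbP x n i := by
  intro i hi
  induction i with
  | zero => simpa [Nat.le_zero.mp hi] using h.2.1
  | succ k ih =>
    rcases Nat.lt_or_ge mu (k+1) with hlt | hge
    · have hk : mu ≤ k := by omega
      have h1 : orbP x n (k + lam) = orbP x n k := ih hk
      have h2 := congrArg (pySquareMod n) h1
      rw [← orbP_succ, ← orbP_succ] at h2
      have h3 : k + lam + 1 = k + 1 + lam := by omega
      rw [h3] at h2; exact h2
    · have : mu = k + 1 := by omega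
      subst this; exact h.2.1

theorem per_mul (x n : Int) {mu lam : Nat} (h : Good x n mu lam) :
    ∀ (c i : Nat), mu ≤ i → orbP x n (i + c * lam) = orbP x n i := by
  intro c
  induction c with
  | zero => simp
  | succ d ih =>
    intro i hi
    have h1 : orbP x n (i + d * lam + lam) = orbP x n (i + d * lam) :=
      per x n h _ (by omega)
    have h2 := ih i hi
    calc orbP x n (i + (d+1) * lam) = orbP x n (i + d * lam + lam) := by ring_nf
      _ = orbP x n i := by rw [h1, h2]

theorem canon (x n : Int) {mu lam : Nat} (h : Good x n mu lam) :
    ∀ j : Nat, mu ≤ j → orbP x n j = orbP x n (mu + (j - mu) % lam) := by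
  intro j hj
  have hd := Nat.div_add_mod (j - mu) lam
  have hd2 : (j - mu) / lam * lam = lam * ((j - mu) / lam) := Nat.mul_comm _ _
  have hr : (j - mu) % lam ≤ j - mu := Nat.mod_le _ _
  have : j = (mu + (j - mu) % lam) + ((j - mu) / lam) * lam := by omega
  conv_lhs => rw [this]
  exact per_mul x n h _ _ (by omega)

theorem stem_ne (x n : Int) {mu lam : Nat} (h : Good x n mu lam) :
    ∀ i j : Nat, i < mu → i < j → orbP x n i ≠ orbP x n j := by
  intro i j hi hij
  rcases Nat.lt_or_ge j mu with hj | hj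
  · exact h.2.2 i j hij (by omega)
  · rw [canon x n h j hj]
    have hr : (j - mu) % lam < lam := Nat.mod_lt _ h.1
    rcases Nat.eq_or_lt_of_le (Nat.le_of_lt_succ (Nat.lt_succ_of_lt (by omega : i < mu))) with _ | _
    all_goals exact h.2.2 i (mu + (j - mu) % lam) (by omega) (by omega)

theorem mod_eq_self_zero {lamv u v : Nat} (hu : u < lamv) (hv : v < lamv)
    (h : (u + v) % lamv = u) : v = 0 := by
  rcases Nat.lt_or_ge (u + v) lamv with hlt | hge
  · rw [Nat.mod_eq_of_lt hlt] at h; omega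
  · have h2 : (u + v) % lamv = u + v - lamv := by
      have hlt2 : (u + v) - lamv < lamv := by omega
      rw [Nat.mod_eq_sub_mod hge, Nat.mod_eq_of_lt hlt2]
    omega

theorem good_dvd (x n : Int) {mu lam : Nat} (h : Good x n mu lam) :
    ∀ i d : Nat, mu ≤ i → orbP x n (i + d) = orbP x n i → lam ∣ d := by
  intro i d hi heq
  rw [Nat.dvd_iff_mod_eq_zero]
  have h1 := canon x n h (i + d) (by omega)
  have h2 := canon x n h i hi
  rw [h1, h2] at heq
  have hr1 : (i + d - mu) % lam < lam := Nat.mod_lt _ h.1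
  have hr2 : (i - mu) % lam < lam := Nat.mod_lt _ h.1
  have hreq : (i + d - mu) % lam = (i - mu) % lam := by
    by_contra hne
    rcases Nat.lt_or_ge ((i + d - mu) % lam) ((i - mu) % lam) with hlt | hge
    · exact h.2.2 (mu + (i + d - mu) % lam) (mu + (i - mu) % lam) (by omega) (by omega) heq
    · exact h.2.2 (mu + (i - mu) % lam) (mu + (i + d - mu) % lam) (by omega) (by omega) heq.symm
  have ha : i + d - mu = (i - mu) + d := by omega
  rw [ha, Nat.add_mod] at hreq
  exact mod_eq_self_zero hr2 (Nat.mod_lt _ h.1) (by omega)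

-- the values 0 % n, 1 % n, … live in a set of n.natAbs residues
noncomputable def resSet (n : Int) : Finset Int :=
  if 0 < n then Finset.Ico 0 n else Finset.Ioc n 0

theorem card_resSet (n : Int) : (resSet n).card = n.natAbs := by
  unfold resSet
  split_ifs with h
  · rw [Int.card_Ico]; omega
  · rw [Int.card_Ioc]; omega

theorem mod_mem_resSet (a n : Int) (hn : n ≠ 0) : PySem.Int.mod a n ∈ resSet n := by
  unfold resSet
  split_ifs with h
  · have h1 := PySem.Int.mod_nonneg a h
    have h2 := PySem.Int.mod_lt a h
    simp [Finset.mem_Ico]; omega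
  · have h3 : n < 0 := by omega
    have := PySem.Int.mod_neg_bounds a h3
    simp [Finset.mem_Ioc]; omega

theorem orbP_mem_resSet (x n : Int) (hn : n ≠ 0) (k : Nat) : orbP x n k ∈ resSet n := by
  cases k with
  | zero => exact mod_mem_resSet x n hn
  | succ m => rw [orbP_succ]; exact mod_mem_resSet _ n hn

theorem exists_good (x n : Int) (hn : n ≠ 0) : ∃ mu lam, Good x n mu lam := by
  classical
  have hcol : ∃ j, ∃ i, i < j ∧ orbP x n i = orbP x n j := by
    have hmaps : ∀ k ∈ Finset.range (n.natAbs + 1), orbP x n k ∈ resSet n :=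
      fun k _ => orbP_mem_resSet x n hn k
    have hcard : (resSet n).card < (Finset.range (n.natAbs + 1)).card := by
      rw [card_resSet, Finset.card_range]; omega
    obtain ⟨i, _, j, _, hne, heq⟩ :=
      Finset.exists_ne_map_eq_of_card_lt_of_maps_to hcard hmaps
    rcases Nat.lt_or_ge i j with hlt | hge
    · exact ⟨j, i, hlt, heq⟩
    · exact ⟨i, j, by omega, heq.symm⟩
  obtain ⟨i0, hi0, heq0⟩ : ∃ i, i < Nat.find hcol ∧ orbP x n i = orbP x n (Nat.find hcol) :=
    Nat.find_spec hcol
  have hKmin := fun j (hj : j < Nat.find hcol) => Nat.find_min hcol hj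
  have hexi : ∃ i, i < Nat.find hcol ∧ orbP x n i = orbP x n (Nat.find hcol) := ⟨i0, hi0, heq0⟩
  obtain ⟨hmu, hmueq⟩ := Nat.find_spec hexi
  refine ⟨Nat.find hexi, Nat.find hcol - Nat.find hexi, by omega, ?_, ?_⟩
  · have : Nat.find hexi + (Nat.find hcol - Nat.find hexi) = Nat.find hcol := by omega
    rw [this, hmueq]
  · intro i j hij hj heq
    exact hKmin j (by omega) ⟨i, hij, heq⟩

theorem good_card_le (x n : Int) (hn : n ≠ 0) {mu lam : Nat} (h : Good x n mu lam) :
    mu + lam ≤ n.natAbs := by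
  classical
  have hinj : Set.InjOn (fun k => orbP x n k) (Finset.range (mu + lam)) := by
    intro i hi j hj heq
    simp only [Finset.coe_range, Set.mem_Iio] at hi hj
    by_contra hne
    rcases Nat.lt_or_ge i j with hlt | hge
    · exact h.2.2 i j hlt hj heq
    · exact h.2.2 j i (by omega) hi heq.symm
  have hmaps : ∀ k ∈ Finset.range (mu + lam), orbP x n k ∈ resSet n :=
    fun k _ => orbP_mem_resSet x n hn k
  have := Finset.card_le_card_of_injOn _ hmaps hinj
  rwa [Finset.card_range, card_resSet] at this

-- ===== the A side: the dictionary loop computes (mu, lam) when n ≥ 1 =====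
def seenD (x n : Int) (k : Nat) : PySem.Dict Int Int :=
  (List.range k).foldl (fun d i => d.insert (orbP x n i) (i : Int)) PySem.Dict.empty

theorem seenD_items (x n : Int) {mu lam : Nat} (h : Good x n mu lam) (k : Nat)
    (hk : k ≤ mu + lam) :
    (seenD x n k).items = (List.range k).map (fun i => (orbP x n i, (i : Int))) := by
  have hnod : ((List.range k).map (fun i => orbP x n i)).Nodup := by
    rw [List.nodup_map_iff_inj_on List.nodup_range]
    intro i hi j hj heq
    simp only [List.mem_range] at hi hj
    by_contra hne
    rcases Nat.lt_or_ge i j with hlt | hge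
    · exact h.2.2 i j hlt (by omega) heq
    · exact h.2.2 j i (by omega) (by omega) heq.symm
  have := PySem.Dict.items_foldl_insert_fresh (List.range k)
    (fun i => orbP x n i) (fun i => (i : Int)) PySem.Dict.empty
    (by intro a _; exact PySem.Dict.contains_empty _) hnod
  simpa [seenD] using this

theorem seenD_keys_nodup (x n : Int) {mu lam : Nat} (h : Good x n mu lam) (k : Nat)
    (hk : k ≤ mu + lam) : (seenD x n k).keys.Nodup := by
  have : (seenD x n k).keys = (List.range k).map (fun i => orbP x n i) := by
    simp [PySem.Dict.keys, seenD_items x n h k hk, Function.comp]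
  rw [this, List.nodup_map_iff_inj_on List.nodup_range]
  intro i hi j hj heq
  simp only [List.mem_range] at hi hj
  by_contra hne
  rcases Nat.lt_or_ge i j with hlt | hge
  · exact h.2.2 i j hlt (by omega) heq
  · exact h.2.2 j i (by omega) (by omega) heq.symm

theorem seenD_succ (x n : Int) (k : Nat) :
    seenD x n (k + 1) = (seenD x n k).insert (orbP x n k) (k : Int) := by
  simp [seenD, List.range_succ]

theorem seenD_get_lt (x n : Int) {mu lam : Nat} (h : Good x n mu lam) (k : Nat)
    (hk : k < mu + lam) : (seenD x n k).get? (orbP x n k) = none := by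
  rw [PySem.Dict.get?_eq_none_iff_not_mem_keys]
  have hkeys : (seenD x n k).keys = (List.range k).map (fun i => orbP x n i) := by
    simp [PySem.Dict.keys, seenD_items x n h k (by omega), Function.comp]
  rw [hkeys]
  intro hmem
  obtain ⟨i, hi, heq⟩ := List.mem_map.mp hmem
  simp only [List.mem_range] at hi
  exact h.2.2 i k hi hk heq

theorem seenD_get_K (x n : Int) {mu lam : Nat} (h : Good x n mu lam) :
    (seenD x n (mu + lam)).get? (orbP x n (mu + lam)) = some (mu : Int) := by
  rw [h.2.1]
  apply PySem.Dict.get?_of_mem_items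
  · rw [seenD_items x n h _ le_rfl]
    exact List.mem_map.mpr ⟨mu, List.mem_range.mpr (by have := h.1; omega), rfl⟩
  · exact seenD_keys_nodup x n h _ le_rfl

theorem loopA (x n : Int) {mu lam : Nat} (h : Good x n mu lam)
    (hK : ((mu + lam : Nat) : Int) ≤ n) :
    ∀ d k : Nat, k + d = mu + lam →
      find_orbit_period_loop n ((n + 1).toNat - k) (k : Int) (seenD x n k)
        (orbP x n k) = ((mu : Int), (lam : Int)) := by
  intro d
  induction d with
  | zero =>
    intro k hk
    have hkK : k = mu + lam := by omega
    subst hkK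
    have hsplit : (n + 1).toNat - (mu + lam) = ((n + 1).toNat - (mu + lam) - 1) + 1 := by omega
    rw [hsplit]
    unfold find_orbit_period_loop
    rw [seenD_get_K x n h]
    simp
  | succ d ih =>
    intro k hk
    have hkK : k < mu + lam := by omega
    have hcast : ((k : Nat) : Int) ≤ ((mu + lam : Nat) : Int) := by exact_mod_cast Nat.le_of_lt hkK
    have hsplit : (n + 1).toNat - k = ((n + 1).toNat - (k + 1)) + 1 := by omega
    rw [hsplit]
    unfold find_orbit_period_loop
    rw [seenD_get_lt x n h k hkK]
    have hnext : PySem.Int.mod (orbP x n k * orbP x n k) n = orbP x n (k + 1) := by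
      rw [orbP_succ]; rfl
    rw [hnext, ← seenD_succ]
    have hc : ((k : Int) + 1) = ((k + 1 : Nat) : Int) := by push_cast; ring
    rw [hc]
    exact ih (k + 1) (by omega)

theorem A_eq (x n : Int) {mu lam : Nat} (h : Good x n mu lam)
    (hK : ((mu + lam : Nat) : Int) ≤ n) :
    find_orbit_period x n = ((mu : Int), (lam : Int)) := by
  have := loopA x n h hK (mu + lam) 0 (by omega)
  simpa [find_orbit_period, seenD, orbP] using this

-- ===== the B side: all three Floyd phases compute (mu, lam) when n ≠ 0 =====
theorem meet_exists (x n : Int) {mu lam : Nat} (h : Good x n mu lam) :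
    ∃ i, (1 ≤ i ∧ orbP x n (2 * i) = orbP x n i) ∧ i ≤ mu + lam := by
  have hl := h.1
  have hmod : mu % lam < lam := Nat.mod_lt _ hl
  refine ⟨mu - mu % lam + lam, ⟨by omega, ?_⟩, by omega⟩
  have hdvd : lam ∣ (mu - mu % lam + lam) := by
    have : lam ∣ mu - mu % lam := by
      have := Nat.div_add_mod mu lam
      exact ⟨mu / lam, by omega⟩
    exact Dvd.dvd.add this dvd_rfl
  obtain ⟨c, hc⟩ := hdvd
  have h2 : 2 * (mu - mu % lam + lam) = (mu - mu % lam + lam) + c * lam := by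
    rw [Nat.mul_comm c lam, ← hc]; ring
  rw [h2]
  exact per_mul x n h c _ (by omega)

theorem meetF (x n : Int) {mu lam istar : Nat} (h : Good x n mu lam)
    (h1 : 1 ≤ istar) (h2 : orbP x n (2 * istar) = orbP x n istar)
    (hmin : ∀ i, 1 ≤ i → i < istar → orbP x n (2 * i) ≠ orbP x n i) :
    ∀ (fuel i : Nat), 1 ≤ i → i ≤ istar → istar ≤ i + fuel →
      floydMeet n fuel (orbP x n i) (orbP x n (2 * i)) = orbP x n istar := by
  intro fuel
  induction fuel with
  | zero =>
    intro i hi1 hi2 hi3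
    have : i = istar := by omega
    subst this
    simp only [floydMeet]; exact h2
  | succ f ih =>
    intro i hi1 hi2 hi3
    by_cases heq : orbP x n i = orbP x n (2 * i)
    · have : i = istar := by
        by_contra hne
        exact hmin i hi1 (by omega) heq.symm
      subst this
      simp only [floydMeet, if_pos heq]
      rw [← heq]
    · have hilt : i < istar := by
        rcases Nat.eq_or_lt_of_le hi2 with he | hlt
        · subst he; exact absurd h2.symm heq
        · exact hlt
      have step : floydMeet n (f + 1) (orbP x n i) (orbP x n (2 * i)) =
          floydMeet n f (orbP x n (i + 1)) (orbP x n (2 * (i + 1))) := by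
        have e1 : pySquareMod n (orbP x n i) = orbP x n (i + 1) := (orbP_succ x n i).symm
        have e2 : pySquareMod n (pySquareMod n (orbP x n (2 * i))) = orbP x n (2 * (i + 1)) := by
          have h21 : 2 * (i + 1) = (2 * i + 1) + 1 := by ring
          rw [h21, orbP_succ, orbP_succ]
        simp only [floydMeet, if_neg heq, e1, e2]
      rw [step]
      exact ih (i + 1) (by omega) (by omega) (by omega)

theorem rhoF (x n : Int) {mu lam istar : Nat} (h : Good x n mu lam)
    (hge : mu ≤ istar) (hdvd : lam ∣ istar) (h1 : 1 ≤ istar) :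
    ∀ (fuel j : Nat), j ≤ mu → mu ≤ j + fuel →
      floydRho n fuel (orbP x n j) (orbP x n (istar + j)) = (((mu - j : Nat) : Int), orbP x n mu) := by
  have key : ∀ j, j ≤ mu → (orbP x n j = orbP x n (istar + j) ↔ j = mu) := by
    intro j hj
    constructor
    · intro heq
      by_contra hne
      exact stem_ne x n h j (istar + j) (by omega) (by omega) heq
    · intro hjmu
      obtain ⟨c, hc⟩ := hdvd
      have hper := per_mul x n h c mu le_rfl
      have hrw : istar + j = mu + c * lam := by rw [hc, hjmu]; ring
      rw [hjmu] at hrw ⊢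
      rw [hrw, hper]
  intro fuel
  induction fuel with
  | zero =>
    intro j hj hj2
    have hjmu : j = mu := by omega
    subst hjmu
    simp [floydRho]
  | succ f ih =>
    intro j hj hj2
    by_cases heq : orbP x n j = orbP x n (istar + j)
    · have hjmu : j = mu := (key j hj).mp heq
      subst hjmu
      simp [floydRho, if_pos heq]
    · have hjlt : j < mu := by
        rcases Nat.eq_or_lt_of_le hj with he | hlt
        · exact absurd ((key j hj).mpr he) heq
        · exact hlt
      have e1 : pySquareMod n (orbP x n j) = orbP x n (j + 1) := (orbP_succ x n j).symm
      have e2 : pySquareMod n (orbP x n (istar + j)) = orbP x n (istar + (j + 1)) := by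
        rw [← orbP_succ]; congr 1
      have step := ih (j + 1) (by omega) (by omega)
      simp only [floydRho, if_neg heq, e1, e2, step, Prod.mk.injEq]
      refine ⟨by omega, trivial⟩

theorem lamF (x n : Int) {mu lam : Nat} (h : Good x n mu lam) :
    ∀ (fuel p : Nat), 1 ≤ p → p ≤ lam → lam ≤ p + fuel →
      floydLam n fuel (orbP x n (mu + p)) (orbP x n mu) = ((lam - p : Nat) : Int) := by
  have key : ∀ p, 1 ≤ p → p ≤ lam → (orbP x n (mu + p) = orbP x n mu ↔ p = lam) := by
    intro p h1 h2
    constructor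
    · intro heq
      by_contra hne
      exact h.2.2 mu (mu + p) (by omega) (by omega) heq.symm
    · intro hp; subst hp; exact h.2.1
  intro fuel
  induction fuel with
  | zero =>
    intro p h1 h2 h3
    have : p = lam := by omega
    subst this
    simp [floydLam]
  | succ f ih =>
    intro p h1 h2 h3
    by_cases heq : orbP x n (mu + p) = orbP x n mu
    · have : p = lam := (key p h1 h2).mp heq
      subst this
      simp [floydLam, heq]
    · have hplt : p < lam := by
        rcases Nat.eq_or_lt_of_le h2 with he | hlt
        · exact absurd ((key p h1 h2).mpr he) heq
        · exact hlt
      have e1 : pySquareMod n (orbP x n (mu + p)) = orbP x n (mu + (p + 1)) := by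
        rw [← orbP_succ]; congr 1
      have step := ih (p + 1) (by omega) (by omega) (by omega)
      simp only [floydLam, if_neg heq, e1, step]
      omega

theorem B_eq (x n : Int) (hn : n ≠ 0) {mu lam : Nat} (h : Good x n mu lam) :
    find_orbit_period_alt x n = ((mu : Int), (lam : Int)) := by
  classical
  obtain ⟨i0, hi0, hi0le⟩ := meet_exists x n h
  have hex : ∃ i, 1 ≤ i ∧ orbP x n (2 * i) = orbP x n i := ⟨i0, hi0⟩
  obtain ⟨h1, h2⟩ : 1 ≤ Nat.find hex ∧ orbP x n (2 * Nat.find hex) = orbP x n (Nat.find hex) :=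
    Nat.find_spec hex
  set istar := Nat.find hex with histar
  have hmin : ∀ i, 1 ≤ i → i < istar → orbP x n (2 * i) ≠ orbP x n i := by
    intro i ha hb hc
    exact Nat.find_min hex hb ⟨ha, hc⟩
  have histar_le : istar ≤ mu + lam := le_trans (Nat.find_min' hex hi0) hi0le
  have hcard := good_card_le x n hn h
  have hge : mu ≤ istar := by
    by_contra hlt
    exact stem_ne x n h istar (2 * istar) (by omega) (by omega) h2.symm
  have hdvd : lam ∣ istar := by
    have h2' : orbP x n (istar + istar) = orbP x n istar := by
      have e : 2 * istar = istar + istar := by ring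
      rwa [e] at h2
    exact good_dvd x n h istar istar hge h2'
  have hmeet : floydMeet n (n.natAbs + 2) (orbP x n 1) (orbP x n 2) = orbP x n istar := by
    have := meetF x n h h1 h2 hmin (n.natAbs + 2) 1 le_rfl h1 (by omega)
    simpa using this
  have hrho : floydRho n (n.natAbs + 2) (orbP x n 0) (orbP x n istar) =
      ((mu : Int), orbP x n mu) := by
    have := rhoF x n h hge hdvd h1 (n.natAbs + 2) 0 (by omega) (by omega)
    simpa using this
  have hlam : floydLam n (n.natAbs + 2) (orbP x n (mu + 1)) (orbP x n mu) = ((lam - 1 : Nat) : Int) :=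
    lamF x n h (n.natAbs + 2) 1 le_rfl h.1 (by omega)
  have hdef : find_orbit_period_alt x n =
      ((floydRho n (n.natAbs + 2) (orbP x n 0)
          (floydMeet n (n.natAbs + 2) (orbP x n 1) (orbP x n 2))).1,
        1 + floydLam n (n.natAbs + 2)
          (pySquareMod n (floydRho n (n.natAbs + 2) (orbP x n 0)
            (floydMeet n (n.natAbs + 2) (orbP x n 1) (orbP x n 2))).2)
          (floydRho n (n.natAbs + 2) (orbP x n 0)
            (floydMeet n (n.natAbs + 2) (orbP x n 1) (orbP x n 2))).2) := by
    rfl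
  rw [hdef, hmeet, hrho]
  have hproj2 : ((mu : Int), orbP x n mu).2 = orbP x n mu := rfl
  have hproj1 : ((mu : Int), orbP x n mu).1 = (mu : Int) := rfl
  rw [hproj1, hproj2, ← orbP_succ, hlam]
  have hl1 : (1 : Int) + ((lam - 1 : Nat) : Int) = (lam : Int) := by
    have := h.1; omega
  rw [hl1]

-- ===== VERDICT (by name: the statement is the Claim_ definition above) =====
theorem find_orbit_period_spec : Claim_equal_find_orbit_period := by
  intro x n _ hn
  show find_orbit_period x n = find_orbit_period_alt x n
  have hn0 : n ≠ 0 := by unfold Pre_find_orbit_period at hn; omega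
  obtain ⟨mu, lam, hgood⟩ := exists_good x n hn0
  have hcard := good_card_le x n hn0 hgood
  have hK : ((mu + lam : Nat) : Int) ≤ n := by
    unfold Pre_find_orbit_period at hn
    have : n.natAbs = n.toNat := by omega
    omega
  rw [A_eq x n hgood hK, B_eq x n hn0 hgood]
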